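-- pv_equiv track=rewrite | github.com/idesa013/phrases | phrase_game.py | refine_parts
-- ===== SOURCE A (Python) =====
-- def refine_parts(parts: list[str]) -> list[str]:
--     """Сделать части более удобными для чтения и игры."""
--     refined: list[str] = []
--     for part in parts:
--         if len(part) >= 3:
--             refined.append(part)
--             continue
--
--         if refined:
--             refined[-1] += part
--         else:
--             refined.append(part)
--
--     return refined
-- ===== SOURCE B (Python) =====
-- def refine_parts(parts: list[str]) -> list[str]:
--     """Сделать части более удобными для чтения и игры."""
--     # Span scan: for each output element, find in one inner scan the maximal run
--     # of following short parts (len < 3), emit the joined slice at once, jump past it.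
--     res: list[str] = []
--     i, n = 0, len(parts)
--     while i < n:
--         j = i + 1
--         while j < n and len(parts[j]) < 3:
--             j += 1
--         res.append(''.join(parts[i:j]))
--         i = j
--     return res
-- ===== Notes on version B (the rewrite author's own statement) =====
-- stated objective: alternative
-- what changed: B replaces A's fold that appends or mutates the last element of a growing result with a two-pointer span scan: an inner scan finds the maximal run of short parts after each opener, and each output element is produced once as a join of a slice, never revisited.
import Mathlib
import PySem

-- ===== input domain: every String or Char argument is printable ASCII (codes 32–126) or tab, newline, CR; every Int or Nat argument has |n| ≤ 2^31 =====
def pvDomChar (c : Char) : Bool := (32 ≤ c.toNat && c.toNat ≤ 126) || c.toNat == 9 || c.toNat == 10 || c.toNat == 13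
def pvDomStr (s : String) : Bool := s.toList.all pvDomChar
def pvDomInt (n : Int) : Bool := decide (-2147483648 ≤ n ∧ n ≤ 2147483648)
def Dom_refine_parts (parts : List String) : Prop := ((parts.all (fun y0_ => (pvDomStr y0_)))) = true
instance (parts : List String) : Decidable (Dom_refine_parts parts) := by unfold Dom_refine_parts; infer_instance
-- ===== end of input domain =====

-- B replaces A's fold (append / mutate the last result element) with a two-pointer span
-- scan: an inner scan finds the maximal run of short parts after each opener and each
-- output element is emitted once as a join of a slice (alternative decomposition).

-- ===== PORT A =====
-- refined[-1] += part : replace the last element of the list by its concatenation with part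
def pvAddToLast : List String → String → List String
  | [], _ => []
  | [x], p => [x ++ p]
  | x :: y :: xs, p => x :: pvAddToLast (y :: xs) p

def refine_parts (parts : List String) : List String :=
  parts.foldl (fun refined part =>
    if PySem.Str.len part ≥ 3 then refined ++ [part]
    else if refined ≠ [] then pvAddToLast refined part
    else refined ++ [part]) []

-- ===== PORT B =====
-- B's inner 'while j < n and len(parts[j]) < 3: j += 1' scan computes the maximal short
-- run after the opener; ''.join(parts[i:j]) joins that slice; 'i = j' jumps past it.
-- Ported as structural recursion on the suffix: takeWhile/dropWhile is exactly that
-- maximal run and the remaining suffix.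
def pvSpanScan (l : List String) : List String :=
  match l with
  | [] => []
  | p :: ps =>
      PySem.Str.join "" (p :: ps.takeWhile (fun q => PySem.Str.len q < 3))
        :: pvSpanScan (ps.dropWhile (fun q => PySem.Str.len q < 3))
termination_by l.length
decreasing_by
  simpa using Nat.lt_succ_of_le (List.length_dropWhile_le _ ps)

def refine_parts_alt (parts : List String) : List String := pvSpanScan parts

-- ===== PRECONDITION & SPEC =====
def Spec_refine_parts (parts : List String) (out : List String) : Prop := out = refine_parts_alt parts
instance (parts : List String) (out : List String) : Decidable (Spec_refine_parts parts out) := by unfold Spec_refine_parts; infer_instance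

-- ===== CLAIM (what is proved, stated in full; the proofs are below) =====
def Claim_equal_refine_parts : Prop := ∀ (parts : List String), Dom_refine_parts parts → Spec_refine_parts parts (refine_parts parts)

-- ===== LEMMAS AND PROOFS =====

-- ''.join with empty separator is concatenation of the pieces
theorem pv_join_empty_sep (l : List (List Char)) : PySem.Chars.join [] l = l.flatten := by
  induction l with
  | nil => simp [PySem.Chars.join_nil]
  | cons p rest ih =>
    cases rest with
    | nil => simp [PySem.Chars.join_singleton]
    | cons q r => simp [PySem.Chars.join_cons_cons, ih]

theorem pv_join_cons (p : String) (l : List String) :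
    PySem.Str.join "" (p :: l) = p ++ PySem.Str.join "" l := by
  apply String.toList_injective
  simp [PySem.Str.toList_join, pv_join_empty_sep]

theorem pv_join_nil : PySem.Str.join "" ([] : List String) = "" := by
  apply String.toList_injective
  simp [PySem.Str.toList_join]

-- A's loop body, named so the lemmas can speak about it
def pvStepA (refined : List String) (part : String) : List String :=
  if PySem.Str.len part ≥ 3 then refined ++ [part]
  else if refined ≠ [] then pvAddToLast refined part
  else refined ++ [part]

theorem pv_addToLast_append (init acc : List String) (p : String) (h : acc ≠ []) :
    pvAddToLast (init ++ acc) p = init ++ pvAddToLast acc p := by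
  induction init with
  | nil => rfl
  | cons x xs ih =>
    have key : pvAddToLast (x :: (xs ++ acc)) p = x :: pvAddToLast (xs ++ acc) p := by
      cases hxa : xs ++ acc with
      | nil => exact absurd (List.append_eq_nil_iff.mp hxa).2 h
      | cons y ys => rfl
    simp only [List.cons_append, key, ih]

theorem pv_stepA_ne_nil (acc : List String) (p : String) (h : acc ≠ []) :
    pvStepA acc p ≠ [] := by
  unfold pvStepA
  split_ifs with h1 <;> simp_all
  cases acc with
  | nil => simp_all
  | cons x xs => cases xs <;> simp [pvAddToLast]

-- frame: a nonempty accumulator's prefix is never touched by A's loop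
theorem pv_frame (parts : List String) (init acc : List String) (h : acc ≠ []) :
    parts.foldl pvStepA (init ++ acc) = init ++ parts.foldl pvStepA acc := by
  induction parts generalizing acc with
  | nil => rfl
  | cons p ps ih =>
    have hstep : pvStepA (init ++ acc) p = init ++ pvStepA acc p := by
      unfold pvStepA
      split_ifs with h1 h2 <;> simp_all [pv_addToLast_append]
    rw [List.foldl_cons, List.foldl_cons, hstep]
    exact ih _ (pv_stepA_ne_nil acc p h)

-- A's loop from a singleton accumulator = the head of a span plus B's scan of the rest
theorem pv_main (ps : List String) (x : String) :
    ps.foldl pvStepA [x]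
      = (x ++ PySem.Str.join "" (ps.takeWhile (fun q => PySem.Str.len q < 3)))
        :: pvSpanScan (ps.dropWhile (fun q => PySem.Str.len q < 3)) := by
  induction ps generalizing x with
  | nil => simp [pvSpanScan, pv_join_nil]
  | cons q qs ih =>
    by_cases hq : PySem.Str.len q < 3
    · have hq' : q.length < 3 := by
        simp [PySem.Str.len_eq] at hq; exact_mod_cast hq
      have hstep : pvStepA [x] q = [x ++ q] := by
        unfold pvStepA; simp [pvAddToLast, Nat.not_le.mpr hq']
      rw [List.foldl_cons, hstep, ih]
      simp [hq', pv_join_cons, String.append_assoc]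
    · have hq' : ¬ q.length < 3 := by
        simp [PySem.Str.len_eq] at hq; omega
      have hstep : pvStepA [x] q = [x] ++ [q] := by
        unfold pvStepA; simp [Nat.not_lt.mp hq']
      rw [List.foldl_cons, hstep, pv_frame qs [x] [q] (by simp), ih]
      simp [hq', pvSpanScan, pv_join_nil, pv_join_cons]

-- ===== VERDICT (by name: the statement is the Claim_ definition above) =====
theorem refine_parts_spec : Claim_equal_refine_parts := by
  intro parts _
  unfold Spec_refine_parts refine_parts refine_parts_alt
  show parts.foldl pvStepA [] = pvSpanScan parts
  cases parts with
  | nil => simp [pvSpanScan]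
  | cons p ps =>
    have h0 : pvStepA [] p = [p] := by
      unfold pvStepA; split_ifs <;> simp_all
    rw [List.foldl_cons, h0, pv_main, pvSpanScan]
    simp [pv_join_cons]
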